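-- pv_equiv track=rewrite | github.com/regulondbunam/RegulonDB-Datamarts | src/datamarts/domain/regulon_datamart/summary.py | get_counts_of_regulated_object
-- ===== SOURCE A (Python) =====
-- def get_counts_of_regulated_object(regulated_list):
--     count_object = {"repressed": 0, "activated": 0, "dual": 0, "unknown": 0, "total": len(regulated_list)}
--     for regulated_item in regulated_list:
--         if regulated_item["function"]:
--             if regulated_item["function"] == "repressor":
--                 count_object["repressed"] = count_object.get("repressed", 0) + 1
--             if regulated_item["function"] == "activator":
--                 count_object["activated"] = count_object.get("activated", 0) + 1
--             if regulated_item["function"] == "dual":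
--                 count_object["dual"] = count_object.get("dual", 0) + 1
--         else:
--             count_object["unknown"] = count_object.get("unknown", 0) + 1
--     return count_object
-- ===== SOURCE B (Python) =====
-- def get_counts_of_regulated_object(regulated_list):
--     functions = [item["function"] for item in regulated_list]
--     return {
--         "repressed": functions.count("repressor"),
--         "activated": functions.count("activator"),
--         "dual": functions.count("dual"),
--         "unknown": len(functions) - sum(1 for f in functions if f),
--         "total": len(functions),
--     }
-- ===== Notes on version B (the rewrite author's own statement) =====
-- stated objective: simpler
-- what changed: Replaces A's single stateful loop of dict updates by staged passes: extract the function values once, then compute each category with an independent list.count pass and derive unknown arithmetically as total minus the number of truthy values.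
import Mathlib
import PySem

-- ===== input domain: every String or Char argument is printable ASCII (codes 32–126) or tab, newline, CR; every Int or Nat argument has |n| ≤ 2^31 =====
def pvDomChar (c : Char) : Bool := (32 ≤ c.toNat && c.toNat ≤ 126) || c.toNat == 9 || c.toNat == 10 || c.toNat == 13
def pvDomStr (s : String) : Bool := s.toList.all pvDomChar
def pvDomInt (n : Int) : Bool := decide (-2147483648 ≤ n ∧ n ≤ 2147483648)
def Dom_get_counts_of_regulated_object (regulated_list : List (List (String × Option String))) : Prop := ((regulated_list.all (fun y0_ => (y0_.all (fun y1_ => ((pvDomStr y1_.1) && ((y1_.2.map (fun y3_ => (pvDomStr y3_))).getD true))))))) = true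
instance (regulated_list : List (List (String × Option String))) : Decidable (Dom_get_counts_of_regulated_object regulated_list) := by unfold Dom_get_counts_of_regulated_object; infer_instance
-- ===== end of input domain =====

-- B replaces A's single stateful loop of dict updates by staged passes: extract the
-- function values once, count each category independently, and derive unknown as
-- total minus the number of truthy values (objective: simpler).

-- ===== PORT A =====
-- item["function"]: first-match lookup in the item dict (none = KeyError, excluded by Pre_)
def pvFn (item : List (String × Option String)) : Option (Option String) :=
  PySem.Dict.get? (PySem.Dict.mk item) "function"

-- Python truthiness of an Optional[str]: None and "" are falsy
def pvTruthy (f : Option String) : Bool :=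
  match f with
  | some s => !(s == "")
  | none => false

-- body of A's 'for regulated_item in regulated_list' loop
def pvStepA (co : PySem.Dict String Int) (item : List (String × Option String)) :
    PySem.Dict String Int :=
  match pvFn item with
  | none => co  -- Python raises KeyError here; such inputs are excluded by Pre_
  | some f =>
    if pvTruthy f then
      let co1 := if f == some "repressor" then co.insert "repressed" (co.getD "repressed" 0 + 1) else co
      let co2 := if f == some "activator" then co1.insert "activated" (co1.getD "activated" 0 + 1) else co1
      if f == some "dual" then co2.insert "dual" (co2.getD "dual" 0 + 1) else co2
    else co.insert "unknown" (co.getD "unknown" 0 + 1)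

def get_counts_of_regulated_object (regulated_list : List (List (String × Option String))) : List (String × Int) :=
  (regulated_list.foldl pvStepA
    (PySem.Dict.mk [("repressed", 0), ("activated", 0), ("dual", 0), ("unknown", 0),
                    ("total", (regulated_list.length : Int))])).items

-- ===== PORT B =====
def get_counts_of_regulated_object_alt (regulated_list : List (List (String × Option String))) : List (String × Int) :=
  -- functions = [item["function"] for item in regulated_list] (missing key = KeyError: excluded by Pre_)
  let fs : List (Option String) := regulated_list.filterMap pvFn
  [("repressed", PySem.List.count fs (some "repressor")),
   ("activated", PySem.List.count fs (some "activator")),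
   ("dual", PySem.List.count fs (some "dual")),
   -- len(functions) - sum(1 for f in functions if f)
   ("unknown", (fs.length : Int) - fs.foldl (fun acc f => if pvTruthy f then acc + 1 else acc) 0),
   ("total", (fs.length : Int))]

-- ===== PRECONDITION & SPEC =====
-- Pre_ excludes exactly the inputs on which A raises KeyError: an item without a "function" key.
def Pre_get_counts_of_regulated_object (regulated_list : List (List (String × Option String))) : Prop :=
  (regulated_list.all (fun item => PySem.Dict.contains (PySem.Dict.mk item) "function")) = true
instance (regulated_list : List (List (String × Option String))) : Decidable (Pre_get_counts_of_regulated_object regulated_list) := by unfold Pre_get_counts_of_regulated_object; infer_instance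

def pvWitness_get_counts_of_regulated_object : (List (List (String × Option String))) :=
  [[("function", some "repressor")], [("function", none)], [("function", some "x")], [("function", some "")]]

def Spec_get_counts_of_regulated_object (regulated_list : List (List (String × Option String))) (out : List (String × Int)) : Prop := out = get_counts_of_regulated_object_alt regulated_list
instance (regulated_list : List (List (String × Option String))) (out : List (String × Int)) : Decidable (Spec_get_counts_of_regulated_object regulated_list out) := by unfold Spec_get_counts_of_regulated_object; infer_instance

-- ===== CLAIM =====
def Claim_equal_get_counts_of_regulated_object : Prop := ∀ (regulated_list : List (List (String × Option String))), Dom_get_counts_of_regulated_object regulated_list → Pre_get_counts_of_regulated_object regulated_list → Spec_get_counts_of_regulated_object regulated_list (get_counts_of_regulated_object regulated_list)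

-- ===== LEMMAS AND PROOFS =====

-- the four predicates on an item that the counts are about
def pvIsR (item : List (String × Option String)) : Bool := pvFn item == some (some "repressor")
def pvIsA (item : List (String × Option String)) : Bool := pvFn item == some (some "activator")
def pvIsD (item : List (String × Option String)) : Bool := pvFn item == some (some "dual")
def pvIsU (item : List (String × Option String)) : Bool := ((pvFn item).map (fun f => !pvTruthy f)).getD false

-- A's loop, started from the canonical 5-key state, adds the four counts
theorem pvFoldA_items (l : List (List (String × Option String)))
    (h : ∀ item ∈ l, (pvFn item).isSome = true) (r a d u n : Int) :
    (l.foldl pvStepA (PySem.Dict.mk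
        [("repressed", r), ("activated", a), ("dual", d), ("unknown", u), ("total", n)])).items
    = [("repressed", r + l.countP pvIsR), ("activated", a + l.countP pvIsA),
       ("dual", d + l.countP pvIsD), ("unknown", u + l.countP pvIsU), ("total", n)] := by
  induction l generalizing r a d u n with
  | nil => simp
  | cons item t ih =>
    obtain ⟨f, hf⟩ := Option.isSome_iff_exists.mp (h item (List.mem_cons_self))
    have ht : ∀ it ∈ t, (pvFn it).isSome = true := fun it hit => h it (List.mem_cons_of_mem _ hit)
    rw [List.foldl_cons]
    by_cases htr : pvTruthy f = true
    · by_cases hr : f = some "repressor"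
      · have hstep : pvStepA (PySem.Dict.mk
            [("repressed", r), ("activated", a), ("dual", d), ("unknown", u), ("total", n)]) item
            = PySem.Dict.mk [("repressed", r + 1), ("activated", a), ("dual", d), ("unknown", u), ("total", n)] := by
          simp [pvStepA, hf, pvTruthy, hr, PySem.Dict.insert, PySem.Dict.getD, PySem.Dict.get?]
        rw [hstep, ih ht]
        simp [List.countP_cons, pvIsR, pvIsA, pvIsD, pvIsU, hf, hr]
        omega
      · by_cases ha : f = some "activator"
        · have hstep : pvStepA (PySem.Dict.mk
              [("repressed", r), ("activated", a), ("dual", d), ("unknown", u), ("total", n)]) item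
              = PySem.Dict.mk [("repressed", r), ("activated", a + 1), ("dual", d), ("unknown", u), ("total", n)] := by
            simp [pvStepA, hf, pvTruthy, ha, PySem.Dict.insert, PySem.Dict.getD, PySem.Dict.get?]
          rw [hstep, ih ht]
          simp [List.countP_cons, pvIsR, pvIsA, pvIsD, pvIsU, hf, hr, ha]
          omega
        · by_cases hd : f = some "dual"
          · have hstep : pvStepA (PySem.Dict.mk
                [("repressed", r), ("activated", a), ("dual", d), ("unknown", u), ("total", n)]) item
                = PySem.Dict.mk [("repressed", r), ("activated", a), ("dual", d + 1), ("unknown", u), ("total", n)] := by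
              simp [pvStepA, hf, pvTruthy, hd, PySem.Dict.insert, PySem.Dict.getD, PySem.Dict.get?]
            rw [hstep, ih ht]
            simp [List.countP_cons, pvIsR, pvIsA, pvIsD, pvIsU, hf, hr, ha, hd]
            omega
          · have hstep : pvStepA (PySem.Dict.mk
                [("repressed", r), ("activated", a), ("dual", d), ("unknown", u), ("total", n)]) item
                = PySem.Dict.mk [("repressed", r), ("activated", a), ("dual", d), ("unknown", u), ("total", n)] := by
              simp [pvStepA, hf, htr, hr, ha, hd]
            rw [hstep, ih ht]
            simp [pvIsR, pvIsA, pvIsD, pvIsU, hf, hr, ha, hd, htr]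
    · have hstep : pvStepA (PySem.Dict.mk
          [("repressed", r), ("activated", a), ("dual", d), ("unknown", u), ("total", n)]) item
          = PySem.Dict.mk [("repressed", r), ("activated", a), ("dual", d), ("unknown", u + 1), ("total", n)] := by
        simp [pvStepA, hf, htr, PySem.Dict.insert, PySem.Dict.getD, PySem.Dict.get?]
      rw [hstep, ih ht]
      have hfr : f ≠ some "repressor" := by rintro rfl; simp [pvTruthy] at htr
      have hfa : f ≠ some "activator" := by rintro rfl; simp [pvTruthy] at htr
      have hfd : f ≠ some "dual" := by rintro rfl; simp [pvTruthy] at htr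
      simp [pvIsR, pvIsA, pvIsD, pvIsU, hf, hfr, hfa, hfd, htr]
      omega

-- B's count over the extracted values is A's countP over the items
theorem pvCount_filterMap (l : List (List (String × Option String))) (v : Option String) :
    PySem.List.count (l.filterMap pvFn) v
    = (l.countP (fun it => pvFn it == some v) : Int) := by
  rw [PySem.List.count_eq, List.count_filterMap]

-- under Pre_, filterMap drops nothing
theorem pvLen_filterMap (l : List (List (String × Option String)))
    (h : ∀ item ∈ l, (pvFn item).isSome = true) :
    (l.filterMap pvFn).length = l.length := by
  induction l with
  | nil => rfl
  | cons x t ih =>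
    obtain ⟨f, hf⟩ := Option.isSome_iff_exists.mp (h x (List.mem_cons_self))
    simp [hf, ih (fun it hit => h it (List.mem_cons_of_mem _ hit))]

-- truthy-valued and falsy-valued items partition the list
theorem pvKey (l : List (List (String × Option String)))
    (h : ∀ item ∈ l, (pvFn item).isSome = true) :
    (l.filterMap pvFn).countP pvTruthy + l.countP pvIsU = l.length := by
  induction l with
  | nil => rfl
  | cons x t ih =>
    obtain ⟨f, hf⟩ := Option.isSome_iff_exists.mp (h x List.mem_cons_self)
    have := ih (fun it hit => h it (List.mem_cons_of_mem _ hit))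
    by_cases htr : pvTruthy f = true <;>
      simp [pvIsU, hf, htr] <;> omega

-- B's arithmetic unknown equals A's unknown count
theorem pvUnknown_arith (l : List (List (String × Option String)))
    (h : ∀ item ∈ l, (pvFn item).isSome = true) :
    (l.length : Int)
      - (l.filterMap pvFn).foldl (fun acc f => if pvTruthy f then acc + 1 else acc) 0
    = (l.countP pvIsU : Int) := by
  rw [PySem.List.foldl_if_add_one]
  have h1 := pvKey l h
  omega

-- ===== VERDICT =====
theorem get_counts_of_regulated_object_spec : Claim_equal_get_counts_of_regulated_object := by
  intro rl _ hpre
  unfold Spec_get_counts_of_regulated_object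
  unfold Pre_get_counts_of_regulated_object at hpre
  have h : ∀ item ∈ rl, (pvFn item).isSome = true := by
    intro item hit
    have := (List.all_eq_true.mp hpre) item hit
    rwa [pvFn, ← PySem.Dict.contains_eq_isSome_get?]
  unfold get_counts_of_regulated_object get_counts_of_regulated_object_alt
  rw [pvFoldA_items rl h]
  simp only [pvCount_filterMap rl, pvUnknown_arith rl h, pvLen_filterMap rl h]
  unfold pvIsR pvIsA pvIsD
  simp
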